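-- pv_equiv track=rewrite | github.com/uscensusbureau/DAS_2020_GLS_Uncertainty_Evaluation | GLS/main_two_pass_alg.py | find_block_with_siblings
-- ===== SOURCE A (Python) =====
-- def find_block_with_siblings(block_geocodes, parent_width):
--     par_last = block_geocodes[0][:parent_width]
--     for block_geocode in block_geocodes[1:]:
--         par_cur = block_geocode[:parent_width]
--         if par_last == par_cur:
--             return block_geocode
--         par_last = par_cur
--     assert False, "Failed to find a block with siblings"
-- ===== SOURCE B (Python) =====
-- def find_block_with_siblings(block_geocodes, parent_width):
--     # Group the list into maximal runs of consecutive blocks sharing the same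
--     # parent prefix; the answer is the second element of the first run of
--     # length >= 2 (a run of siblings).
--     runs = []
--     i = 0
--     n = len(block_geocodes)
--     while i < n:
--         key = block_geocodes[i][:parent_width]
--         j = i + 1
--         while j < n and block_geocodes[j][:parent_width] == key:
--             j += 1
--         runs.append(block_geocodes[i:j])
--         i = j
--     for run in runs:
--         if len(run) >= 2:
--             return run[1]
--     assert False, "Failed to find a block with siblings"
-- ===== Notes on version B (the rewrite author's own statement) =====
-- stated objective: alternative
-- what changed: Replaces A's single stateful scan (comparing each block's prefix with the previous one and returning early) by a run-length grouping: first partition the list into maximal runs of consecutive blocks with equal parent prefix, then return the second element of the first run of length >= 2.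
import Mathlib
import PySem

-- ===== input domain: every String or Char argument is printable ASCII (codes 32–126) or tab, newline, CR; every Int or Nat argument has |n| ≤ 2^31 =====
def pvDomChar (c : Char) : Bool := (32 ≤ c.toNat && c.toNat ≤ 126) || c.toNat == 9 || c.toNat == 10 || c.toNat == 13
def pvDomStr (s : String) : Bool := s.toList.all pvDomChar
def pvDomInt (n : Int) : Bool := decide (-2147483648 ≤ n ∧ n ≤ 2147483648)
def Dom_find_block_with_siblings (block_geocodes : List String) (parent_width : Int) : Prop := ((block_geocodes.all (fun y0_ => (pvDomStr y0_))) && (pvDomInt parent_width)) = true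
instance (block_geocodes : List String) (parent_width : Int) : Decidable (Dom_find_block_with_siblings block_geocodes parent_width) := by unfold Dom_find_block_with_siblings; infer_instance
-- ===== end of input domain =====

-- B replaces A's stateful early-return scan by run-length grouping into maximal runs of
-- equal parent prefix, then returns the second element of the first run of length >= 2
-- (objective: alternative; equivalence proved on inputs where A returns).


-- ===== PORT A =====
-- b[:parent_width] (Python string slice, negative widths included)
def pvPrefix (s : String) (parent_width : Int) : String :=
  PySem.Str.slice s none (some parent_width)

-- the for-loop of A, carrying par_last; the [] case is Python's 'assert False' (outside Pre_)
def pvLoopA (parent_width : Int) : String → List String → String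
  | _, [] => ""
  | par_last, g :: rest =>
    let par_cur := pvPrefix g parent_width
    if par_last = par_cur then g else pvLoopA parent_width par_cur rest

def find_block_with_siblings (block_geocodes : List String) (parent_width : Int) : String :=
  match block_geocodes with
  | [] => ""  -- block_geocodes[0] raises IndexError (outside Pre_)
  | g0 :: rest => pvLoopA parent_width (pvPrefix g0 parent_width) rest

-- ===== PORT B =====
-- B's outer while loop: split off the maximal leading run of equal parent prefix
-- (the inner 'while j < n and …' loop = takeWhile/dropWhile), then recurse on the rest.
def pvRunsB (parent_width : Int) : List String → List (List String)
  | [] => []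
  | g :: rest =>
    let k := pvPrefix g parent_width
    (g :: rest.takeWhile (fun h => pvPrefix h parent_width == k)) ::
      pvRunsB parent_width (rest.dropWhile (fun h => pvPrefix h parent_width == k))
termination_by l => l.length
decreasing_by
  simp only [List.length_cons]
  exact Nat.lt_succ_of_le (List.length_dropWhile_le _ _)

-- B's second loop: the first run with len >= 2 yields its second element;
-- the [] case is Python's failing assert (outside Pre_)
def pvScanB : List (List String) → String
  | [] => ""
  | r :: rs => if 2 ≤ r.length then (r.drop 1).headD "" else pvScanB rs

def find_block_with_siblings_alt (block_geocodes : List String) (parent_width : Int) : String :=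
  pvScanB (pvRunsB parent_width block_geocodes)

-- ===== PRECONDITION & SPEC =====
-- Pre_ excludes exactly the inputs where A raises: the empty list (IndexError) and lists
-- with no consecutive pair of equal parent prefixes (AssertionError); B also raises there.
def Pre_find_block_with_siblings (block_geocodes : List String) (parent_width : Int) : Prop :=
  ∃ p ∈ block_geocodes.zip block_geocodes.tail,
    pvPrefix p.1 parent_width = pvPrefix p.2 parent_width
instance (block_geocodes : List String) (parent_width : Int) : Decidable (Pre_find_block_with_siblings block_geocodes parent_width) := by unfold Pre_find_block_with_siblings; infer_instance

def pvWitness_find_block_with_siblings : List String × Int := (["11", "12"], 1)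

def Spec_find_block_with_siblings (block_geocodes : List String) (parent_width : Int) (out : String) : Prop := out = find_block_with_siblings_alt block_geocodes parent_width
instance (block_geocodes : List String) (parent_width : Int) (out : String) : Decidable (Spec_find_block_with_siblings block_geocodes parent_width out) := by unfold Spec_find_block_with_siblings; infer_instance

-- ===== CLAIM (what is proved, stated in full; the proofs are below) =====
def Claim_equal_find_block_with_siblings : Prop := ∀ (block_geocodes : List String) (parent_width : Int), Dom_find_block_with_siblings block_geocodes parent_width → Pre_find_block_with_siblings block_geocodes parent_width → Spec_find_block_with_siblings block_geocodes parent_width (find_block_with_siblings block_geocodes parent_width)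

-- ===== LEMMAS AND PROOFS =====
-- A's loop started at a nonempty list equals B's scan over B's runs of that list
-- (both return "" when no sibling pair exists, so no precondition is needed).
theorem pvLoop_eq_runs (parent_width : Int) : ∀ (t : List String) (x : String),
    pvLoopA parent_width (pvPrefix x parent_width) t =
      pvScanB (pvRunsB parent_width (x :: t)) := by
  intro t
  induction hn : t.length using Nat.strong_induction_on generalizing t with
  | _ n ih =>
    intro x
    subst hn
    cases t with
    | nil => simp [pvLoopA, pvRunsB, pvScanB]
    | cons y ys =>
      rw [pvRunsB]
      by_cases h : pvPrefix y parent_width = pvPrefix x parent_width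
      · -- y continues x's run: A returns y; B's first run has ≥ 2 elements, second is y
        simp [pvLoopA, pvScanB, h]
      · -- y starts a new run
        have hb : (pvPrefix y parent_width == pvPrefix x parent_width) = false := by
          simp [h]
        simp only [List.takeWhile_cons, List.dropWhile_cons, hb, Bool.false_eq_true,
          if_false]
        rw [pvScanB]
        simp only [List.length_cons, List.length_nil]
        rw [if_neg (by omega)]
        simp only [pvLoopA]
        rw [if_neg (fun he => h he.symm)]
        exact ih ys.length (by simp) ys rfl y

-- ===== VERDICT (by name: the statement is the Claim_ definition above) =====
theorem find_block_with_siblings_spec : Claim_equal_find_block_with_siblings := by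
  intro block_geocodes parent_width _ _
  unfold Spec_find_block_with_siblings find_block_with_siblings find_block_with_siblings_alt
  cases block_geocodes with
  | nil => simp [pvRunsB, pvScanB]
  | cons g0 rest => exact pvLoop_eq_runs parent_width rest g0
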